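-- pv_equiv track=rewrite | github.com/1aljaz/Programiranje1_Vaje | kattis/AljazMarn_SN_1del_2023-24/4_thought.py | resi
-- ===== SOURCE A (Python) =====
-- def izracunaj(st, operatorji):
--     """
--         Vrne izračunan izraz (število), ki mu ga poda funkcija reši.
--     """
--     izraz = list(st)
--     i = 0
--     # Najprej izračunamo množenje/deljenje potem pa še seštevanje/odštevanje
--     while i < len(operatorji):
--         # Preveri operatorje z višjo prioriteto (množenje in deljenje)
--         if operatorji[i] in ['*', '/']:
--             if operatorji[i] == '*':
--                 izraz[i] = izraz[i] * izraz[i+1]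
--             else:
--                 # Preveri deljenje z 0
--                 if izraz[i+1] == 0:
--                     izraz[i] = float('inf')
--                 else:
--                     izraz[i] = izraz[i] // izraz[i+1]
--             # Odstrani uporabljeno število in operator
--             izraz.pop(i+1)
--             operatorji.pop(i)
--         else:
--             i+=1
--
--     i=0
--     # Izračunaj še operatorje z nižjo prioriteto (seštevanje in odštevanje)
--     while i < len(operatorji):
--         if operatorji[i] == '+':
--             izraz[i] = izraz[i] + izraz[i+1]
--         else:
--             izraz[i] = izraz[i] - izraz[i+1]
--         izraz.pop(i+1)
--         operatorji.pop(i)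
--
--     return izraz[0]
--
-- def resi(n):
--     """
--         Vrne izraz, ki ga reši število podano z argumentom. Če takega izraza ni, potem izpiše "no solution".
--     """
--     # Seznam vseh možnih operatorjev
--     operatorji = ['+', '-', '*', '/']
--     # Seznam štirih števil 4
--     stevila = [4, 4, 4, 4]
--
--     # Preizkusi vse možne kombinacije operatorjev
--     for ope1 in operatorji:
--         for ope2 in operatorji:
--             for ope3 in operatorji:
--                 # Tukaj v funkcijo podamo kopijo, saj drugače spremeninjamo seznamu stevila
--                 rezultat = izracunaj(stevila.copy(), [ope1, ope2, ope3])
--                 if rezultat == n: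
--                     return f"4 {ope1} 4 {ope2} 4 {ope3} 4 = {n}"
--
--     return "no solution"
-- ===== SOURCE B (Python) =====
-- def resi(n):
--     """One-pass precedence evaluator (total/sign/last accumulator) instead of
--     the two-pass pop-based izracunaj; same search order over operator combos."""
--     ops = ['+', '-', '*', '/']
--     for a in ops:
--         for b in ops:
--             for c in ops:
--                 total, sign, last = 0, 1, 4
--                 for op in (a, b, c):
--                     if op == '+':
--                         total += sign * last
--                         sign, last = 1, 4
--                     elif op == '-':
--                         total += sign * last
--                         sign, last = -1, 4
--                     elif op == '*':
--                         last *= 4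
--                     else:
--                         last //= 4
--                 if total + sign * last == n:
--                     return f"4 {a} 4 {b} 4 {c} 4 = {n}"
--     return "no solution"
-- ===== Notes on version B (the rewrite author's own statement) =====
-- stated objective: simpler
-- what changed: Replaced the two-pass, list-mutating izracunaj evaluator (mul/div pass with pops, then add/sub pass) by a single left-to-right pass keeping a (total, sign, last) accumulator that handles precedence directly; the triple loop over operator combos is kept in the same order.
import Mathlib
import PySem

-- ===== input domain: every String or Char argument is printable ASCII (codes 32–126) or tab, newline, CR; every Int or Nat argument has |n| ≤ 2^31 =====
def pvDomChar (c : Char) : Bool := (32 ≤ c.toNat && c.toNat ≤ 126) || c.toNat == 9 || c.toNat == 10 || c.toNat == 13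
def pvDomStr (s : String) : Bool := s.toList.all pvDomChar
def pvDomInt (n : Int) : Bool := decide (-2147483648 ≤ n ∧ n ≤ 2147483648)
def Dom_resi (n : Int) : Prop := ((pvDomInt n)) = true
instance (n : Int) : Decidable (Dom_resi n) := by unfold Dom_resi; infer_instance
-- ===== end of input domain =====

-- B replaces A's two-pass pop-based evaluator by a one-pass (total, sign, last) accumulator; objective: simpler.

-- ===== PORT A =====
-- first while loop of izracunaj: multiplication/division pass (pops from both lists).
-- fuel is a totality guard only: each iteration either increments i or shortens operatorji,
-- so 2*operatorji.length steps always suffice and the fuel-exhausted branch is never taken.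
def pass1 (fuel : Nat) (izraz : List Int) (operatorji : List Char) (i : Nat) :
    List Int × List Char :=
  match fuel with
  | 0 => (izraz, operatorji)
  | fuel + 1 =>
    if i < operatorji.length then
      if operatorji.getD i ' ' = '*' ∨ operatorji.getD i ' ' = '/' then
        let v : Int :=
          if operatorji.getD i ' ' = '*' then izraz.getD i 0 * izraz.getD (i+1) 0
          else if izraz.getD (i+1) 0 = 0 then 0
            -- Python sets float('inf') here; unreachable for 4-only operands (the divisor
            -- is always a literal 4), so any Int stands in for it; ported as 0.
          else PySem.Int.floordiv (izraz.getD i 0) (izraz.getD (i+1) 0)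
        pass1 fuel ((izraz.set i v).eraseIdx (i+1)) (operatorji.eraseIdx i) i
      else
        pass1 fuel izraz operatorji (i+1)
    else (izraz, operatorji)

-- second while loop: addition/subtraction pass (i stays put because of the pops).
def pass2 (fuel : Nat) (izraz : List Int) (operatorji : List Char) (i : Nat) :
    List Int × List Char :=
  match fuel with
  | 0 => (izraz, operatorji)
  | fuel + 1 =>
    if i < operatorji.length then
      let v : Int :=
        if operatorji.getD i ' ' = '+' then izraz.getD i 0 + izraz.getD (i+1) 0
        else izraz.getD i 0 - izraz.getD (i+1) 0
      pass2 fuel ((izraz.set i v).eraseIdx (i+1)) (operatorji.eraseIdx i) i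
    else (izraz, operatorji)

def izracunaj (st : List Int) (operatorji : List Char) : Int :=
  let r1 := pass1 (2 * operatorji.length) st operatorji 0
  let r2 := pass2 (2 * r1.2.length) r1.1 r1.2 0
  r2.1.getD 0 0

def resi (n : Int) : String :=
  let operatorji : List Char := ['+', '-', '*', '/']
  let stevila : List Int := [4, 4, 4, 4]
  match operatorji.findSome? (fun ope1 =>
          operatorji.findSome? (fun ope2 =>
            operatorji.findSome? (fun ope3 =>
              if izracunaj stevila [ope1, ope2, ope3] = n then
                some ("4 " ++ String.singleton ope1 ++ " 4 " ++ String.singleton ope2 ++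
                      " 4 " ++ String.singleton ope3 ++ " 4 = " ++ PySem.Int.toStr n)
              else none))) with
  | some s => s
  | none => "no solution"

-- ===== PORT B =====
-- one pass over the three operators, tracking (total, sign, last)
def evalCombo (a b c : Char) : Int :=
  let s := [a, b, c].foldl
    (fun (acc : Int × Int × Int) (op : Char) =>
      let total := acc.1; let sign := acc.2.1; let last := acc.2.2
      if op = '+' then (total + sign * last, 1, 4)
      else if op = '-' then (total + sign * last, -1, 4)
      else if op = '*' then (total, sign, last * 4)
      else (total, sign, PySem.Int.floordiv last 4))
    (0, 1, 4)
  s.1 + s.2.1 * s.2.2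

def resi_alt (n : Int) : String :=
  let ops : List Char := ['+', '-', '*', '/']
  match ops.findSome? (fun a =>
          ops.findSome? (fun b =>
            ops.findSome? (fun c =>
              if evalCombo a b c = n then
                some ("4 " ++ String.singleton a ++ " 4 " ++ String.singleton b ++
                      " 4 " ++ String.singleton c ++ " 4 = " ++ PySem.Int.toStr n)
              else none))) with
  | some s => s
  | none => "no solution"

-- ===== PRECONDITION & SPEC =====
def Spec_resi (n : Int) (out : String) : Prop := out = resi_alt n
instance (n : Int) (out : String) : Decidable (Spec_resi n out) := by unfold Spec_resi; infer_instance

-- ===== CLAIM (what is proved, stated in full; the proofs are below) =====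
def Claim_equal_resi : Prop := ∀ (n : Int), Dom_resi n → Spec_resi n (resi n)

-- ===== LEMMAS AND PROOFS =====

theorem findSome?_congr_mem {α β : Type} (l : List α) (f g : α → Option β)
    (h : ∀ x ∈ l, f x = g x) : l.findSome? f = l.findSome? g := by
  induction l with
  | nil => rfl
  | cons x xs ih =>
    simp only [List.findSome?_cons, h x (List.mem_cons_self ..)]
    cases g x with
    | some v => rfl
    | none => exact ih (fun y hy => h y (List.mem_cons_of_mem _ hy))

-- the two evaluators agree on every combination of the four operators
set_option maxRecDepth 4000 in
theorem eval_agree : ∀ a ∈ ['+', '-', '*', '/'], ∀ b ∈ ['+', '-', '*', '/'],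
    ∀ c ∈ ['+', '-', '*', '/'],
    izracunaj [4, 4, 4, 4] [a, b, c] = evalCombo a b c := by
  intro a ha b hb c hc
  fin_cases ha <;> fin_cases hb <;> fin_cases hc <;> rfl

theorem resi_eq (n : Int) : resi n = resi_alt n := by
  simp only [resi, resi_alt]
  have h : (['+', '-', '*', '/'] : List Char).findSome? (fun ope1 =>
          List.findSome? (fun ope2 =>
            List.findSome? (fun ope3 =>
              if izracunaj [4, 4, 4, 4] [ope1, ope2, ope3] = n then
                some ("4 " ++ String.singleton ope1 ++ " 4 " ++ String.singleton ope2 ++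
                      " 4 " ++ String.singleton ope3 ++ " 4 = " ++ PySem.Int.toStr n)
              else none) ['+', '-', '*', '/']) ['+', '-', '*', '/'])
      = (['+', '-', '*', '/'] : List Char).findSome? (fun a =>
          List.findSome? (fun b =>
            List.findSome? (fun c =>
              if evalCombo a b c = n then
                some ("4 " ++ String.singleton a ++ " 4 " ++ String.singleton b ++
                      " 4 " ++ String.singleton c ++ " 4 = " ++ PySem.Int.toStr n)
              else none) ['+', '-', '*', '/']) ['+', '-', '*', '/']) := by
    apply findSome?_congr_mem
    intro a ha
    apply findSome?_congr_mem
    intro b hb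
    apply findSome?_congr_mem
    intro c hc
    rw [eval_agree a ha b hb c hc]
  rw [h]

-- ===== VERDICT (by name: the statement is the Claim_ definition above) =====
theorem resi_spec : Claim_equal_resi := by
  intro n _
  unfold Spec_resi
  exact resi_eq n
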